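-- pv_equiv track=rewrite | github.com/GeeLeonidas/aedii-bittorrent | src/filechunk.py | convert_filename
-- ===== SOURCE A (Python) =====
-- def convert_filename(filename: str):
--     filename_conv = [0, 0, 0, 0, 0, 0, 0, 0,
--                      0, 0, 0, 0, 0, 0, 0, 0,  # Aceita apenas os primeiros 64 caracteres
--                      0, 0, 0, 0, 0, 0, 0, 0,
--                      0, 0, 0, 0, 0, 0, 0, 0]
--     for i in range(len(filename_conv)):
--         if i >= len(filename):
--             break
--         filename_conv[i] = ord(filename[i])
--         if i + 1 >= len(filename):
--             break
--         filename_conv[i] |= ord(filename[i + 1]) << 16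
--     return (filename_conv[0], filename_conv[1], filename_conv[2], filename_conv[3],
--             filename_conv[4], filename_conv[5], filename_conv[6], filename_conv[7],
--             filename_conv[8], filename_conv[9], filename_conv[10], filename_conv[11],
--             filename_conv[12], filename_conv[13], filename_conv[14], filename_conv[15],
--             filename_conv[16], filename_conv[17], filename_conv[18], filename_conv[19],
--             filename_conv[20], filename_conv[21], filename_conv[22], filename_conv[23],
--             filename_conv[24], filename_conv[25], filename_conv[26], filename_conv[27],
--             filename_conv[28], filename_conv[29], filename_conv[30], filename_conv[31])
-- ===== SOURCE B (Python) =====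
-- def convert_filename(filename: str):
--     # Right-recursion over the characters: each step receives the code of the
--     # following character as a carry, so slot = code | carry << 16 with no
--     # index arithmetic, lookahead or break logic.
--     def go(chars):
--         if not chars:
--             return 0, []
--         carry, rest = go(chars[1:])
--         code = ord(chars[0])
--         return code, [code | (carry << 16)] + rest
--     _, slots = go(list(filename[:33]))
--     return tuple((slots + [0] * 32)[:32])
-- ===== Notes on version B (the rewrite author's own statement) =====
-- stated objective: alternative
-- what changed: Replaces the index loop with two-level break logic, in-place list mutation and s[i+1] lookahead by a right-recursion over the characters that builds the slots back-to-front while carrying the following character's code, zero carry at the end making the last/empty cases uniform.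
import Mathlib
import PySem

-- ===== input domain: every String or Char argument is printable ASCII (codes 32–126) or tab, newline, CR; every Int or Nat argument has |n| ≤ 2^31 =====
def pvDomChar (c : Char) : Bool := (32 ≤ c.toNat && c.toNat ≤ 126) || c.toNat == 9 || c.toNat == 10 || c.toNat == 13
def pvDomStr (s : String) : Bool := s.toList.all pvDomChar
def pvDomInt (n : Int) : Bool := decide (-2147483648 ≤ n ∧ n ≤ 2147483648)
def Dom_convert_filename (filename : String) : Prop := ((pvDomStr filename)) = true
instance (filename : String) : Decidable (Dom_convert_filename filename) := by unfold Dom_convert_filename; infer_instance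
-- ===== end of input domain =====

-- B replaces A's index loop with breaks, mutation and s[i+1] lookahead by a back-to-front
-- recursion over the characters carrying the next character's code (objective: alternative).

-- ===== PORT A =====
-- ord(c)
def pvOrd (c : Char) : Int := (c.toNat : Int)

-- A's `for i in range(32)` loop with its two `break`s; `acc` is the mutated list filename_conv.
def pvLoopA (cs : List Char) (i : Nat) (acc : List Int) : Nat → List Int
  | 0 => acc
  | fuel + 1 =>
    if i ≥ cs.length then acc
    else
      let acc1 := acc.set i (pvOrd (cs.getD i 'a'))
      if i + 1 ≥ cs.length then acc1
      else pvLoopA cs (i + 1) (acc1.set i (Int.lor (acc1.getD i 0) ((pvOrd (cs.getD (i + 1) 'a')) <<< (16 : Nat)))) fuel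

def convert_filename (filename : String) : Int × Int × Int × Int × Int × Int × Int × Int × Int × Int × Int × Int × Int × Int × Int × Int × Int × Int × Int × Int × Int × Int × Int × Int × Int × Int × Int × Int × Int × Int × Int × Int :=
  let fc := pvLoopA filename.toList 0 (List.replicate 32 0) 32
  (fc.getD 0 0, fc.getD 1 0, fc.getD 2 0, fc.getD 3 0,
   fc.getD 4 0, fc.getD 5 0, fc.getD 6 0, fc.getD 7 0,
   fc.getD 8 0, fc.getD 9 0, fc.getD 10 0, fc.getD 11 0,
   fc.getD 12 0, fc.getD 13 0, fc.getD 14 0, fc.getD 15 0,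
   fc.getD 16 0, fc.getD 17 0, fc.getD 18 0, fc.getD 19 0,
   fc.getD 20 0, fc.getD 21 0, fc.getD 22 0, fc.getD 23 0,
   fc.getD 24 0, fc.getD 25 0, fc.getD 26 0, fc.getD 27 0,
   fc.getD 28 0, fc.getD 29 0, fc.getD 30 0, fc.getD 31 0)

-- ===== PORT B =====
-- Source B's `go`: right-recursion; returns (code of first char, slot list), carry = code of the next char.
def pvGo : List Char → Int × List Int
  | [] => (0, [])
  | c :: rest =>
    let r := pvGo rest
    let code := pvOrd c
    (code, Int.lor code (r.1 <<< (16 : Nat)) :: r.2)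

def convert_filename_alt (filename : String) : Int × Int × Int × Int × Int × Int × Int × Int × Int × Int × Int × Int × Int × Int × Int × Int × Int × Int × Int × Int × Int × Int × Int × Int × Int × Int × Int × Int × Int × Int × Int × Int :=
  let slots := ((pvGo (filename.toList.take 33)).2 ++ List.replicate 32 0).take 32
  (slots.getD 0 0, slots.getD 1 0, slots.getD 2 0, slots.getD 3 0,
   slots.getD 4 0, slots.getD 5 0, slots.getD 6 0, slots.getD 7 0,
   slots.getD 8 0, slots.getD 9 0, slots.getD 10 0, slots.getD 11 0,
   slots.getD 12 0, slots.getD 13 0, slots.getD 14 0, slots.getD 15 0,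
   slots.getD 16 0, slots.getD 17 0, slots.getD 18 0, slots.getD 19 0,
   slots.getD 20 0, slots.getD 21 0, slots.getD 22 0, slots.getD 23 0,
   slots.getD 24 0, slots.getD 25 0, slots.getD 26 0, slots.getD 27 0,
   slots.getD 28 0, slots.getD 29 0, slots.getD 30 0, slots.getD 31 0)

-- ===== PRECONDITION & SPEC =====
def Spec_convert_filename (filename : String) (out : Int × Int × Int × Int × Int × Int × Int × Int × Int × Int × Int × Int × Int × Int × Int × Int × Int × Int × Int × Int × Int × Int × Int × Int × Int × Int × Int × Int × Int × Int × Int × Int) : Prop := out = convert_filename_alt filename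
instance (filename : String) (out : Int × Int × Int × Int × Int × Int × Int × Int × Int × Int × Int × Int × Int × Int × Int × Int × Int × Int × Int × Int × Int × Int × Int × Int × Int × Int × Int × Int × Int × Int × Int × Int) : Decidable (Spec_convert_filename filename out) := by
  unfold Spec_convert_filename
  letI : DecidableEq (Int × Int) := instDecidableEqProd
  letI : DecidableEq (Int × Int × Int) := instDecidableEqProd
  letI : DecidableEq (Int × Int × Int × Int) := instDecidableEqProd
  letI : DecidableEq (Int × Int × Int × Int × Int) := instDecidableEqProd
  letI : DecidableEq (Int × Int × Int × Int × Int × Int) := instDecidableEqProd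
  letI : DecidableEq (Int × Int × Int × Int × Int × Int × Int) := instDecidableEqProd
  letI : DecidableEq (Int × Int × Int × Int × Int × Int × Int × Int) := instDecidableEqProd
  letI : DecidableEq (Int × Int × Int × Int × Int × Int × Int × Int × Int) := instDecidableEqProd
  letI : DecidableEq (Int × Int × Int × Int × Int × Int × Int × Int × Int × Int) := instDecidableEqProd
  letI : DecidableEq (Int × Int × Int × Int × Int × Int × Int × Int × Int × Int × Int) := instDecidableEqProd
  letI : DecidableEq (Int × Int × Int × Int × Int × Int × Int × Int × Int × Int × Int × Int) := instDecidableEqProd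
  letI : DecidableEq (Int × Int × Int × Int × Int × Int × Int × Int × Int × Int × Int × Int × Int) := instDecidableEqProd
  letI : DecidableEq (Int × Int × Int × Int × Int × Int × Int × Int × Int × Int × Int × Int × Int × Int) := instDecidableEqProd
  letI : DecidableEq (Int × Int × Int × Int × Int × Int × Int × Int × Int × Int × Int × Int × Int × Int × Int) := instDecidableEqProd
  letI : DecidableEq (Int × Int × Int × Int × Int × Int × Int × Int × Int × Int × Int × Int × Int × Int × Int × Int) := instDecidableEqProd
  letI : DecidableEq (Int × Int × Int × Int × Int × Int × Int × Int × Int × Int × Int × Int × Int × Int × Int × Int × Int) := instDecidableEqProd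
  letI : DecidableEq (Int × Int × Int × Int × Int × Int × Int × Int × Int × Int × Int × Int × Int × Int × Int × Int × Int × Int) := instDecidableEqProd
  letI : DecidableEq (Int × Int × Int × Int × Int × Int × Int × Int × Int × Int × Int × Int × Int × Int × Int × Int × Int × Int × Int) := instDecidableEqProd
  letI : DecidableEq (Int × Int × Int × Int × Int × Int × Int × Int × Int × Int × Int × Int × Int × Int × Int × Int × Int × Int × Int × Int) := instDecidableEqProd
  letI : DecidableEq (Int × Int × Int × Int × Int × Int × Int × Int × Int × Int × Int × Int × Int × Int × Int × Int × Int × Int × Int × Int × Int) := instDecidableEqProd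
  letI : DecidableEq (Int × Int × Int × Int × Int × Int × Int × Int × Int × Int × Int × Int × Int × Int × Int × Int × Int × Int × Int × Int × Int × Int) := instDecidableEqProd
  letI : DecidableEq (Int × Int × Int × Int × Int × Int × Int × Int × Int × Int × Int × Int × Int × Int × Int × Int × Int × Int × Int × Int × Int × Int × Int) := instDecidableEqProd
  letI : DecidableEq (Int × Int × Int × Int × Int × Int × Int × Int × Int × Int × Int × Int × Int × Int × Int × Int × Int × Int × Int × Int × Int × Int × Int × Int) := instDecidableEqProd
  letI : DecidableEq (Int × Int × Int × Int × Int × Int × Int × Int × Int × Int × Int × Int × Int × Int × Int × Int × Int × Int × Int × Int × Int × Int × Int × Int × Int) := instDecidableEqProd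
  letI : DecidableEq (Int × Int × Int × Int × Int × Int × Int × Int × Int × Int × Int × Int × Int × Int × Int × Int × Int × Int × Int × Int × Int × Int × Int × Int × Int × Int) := instDecidableEqProd
  letI : DecidableEq (Int × Int × Int × Int × Int × Int × Int × Int × Int × Int × Int × Int × Int × Int × Int × Int × Int × Int × Int × Int × Int × Int × Int × Int × Int × Int × Int) := instDecidableEqProd
  letI : DecidableEq (Int × Int × Int × Int × Int × Int × Int × Int × Int × Int × Int × Int × Int × Int × Int × Int × Int × Int × Int × Int × Int × Int × Int × Int × Int × Int × Int × Int) := instDecidableEqProd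
  letI : DecidableEq (Int × Int × Int × Int × Int × Int × Int × Int × Int × Int × Int × Int × Int × Int × Int × Int × Int × Int × Int × Int × Int × Int × Int × Int × Int × Int × Int × Int × Int) := instDecidableEqProd
  letI : DecidableEq (Int × Int × Int × Int × Int × Int × Int × Int × Int × Int × Int × Int × Int × Int × Int × Int × Int × Int × Int × Int × Int × Int × Int × Int × Int × Int × Int × Int × Int × Int) := instDecidableEqProd
  letI : DecidableEq (Int × Int × Int × Int × Int × Int × Int × Int × Int × Int × Int × Int × Int × Int × Int × Int × Int × Int × Int × Int × Int × Int × Int × Int × Int × Int × Int × Int × Int × Int × Int) := instDecidableEqProd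
  letI : DecidableEq (Int × Int × Int × Int × Int × Int × Int × Int × Int × Int × Int × Int × Int × Int × Int × Int × Int × Int × Int × Int × Int × Int × Int × Int × Int × Int × Int × Int × Int × Int × Int × Int) := instDecidableEqProd
  infer_instance

-- ===== CLAIM (what is proved, stated in full; the proofs are below) =====
def Claim_equal_convert_filename : Prop := ∀ (filename : String), Dom_convert_filename filename → Spec_convert_filename filename (convert_filename filename)

-- ===== LEMMAS AND PROOFS =====

-- the value slot j holds in both programs
def pvCode (cs : List Char) (k : Nat) : Int := if k < cs.length then pvOrd (cs.getD k 'a') else 0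
def pvF (cs : List Char) (j : Nat) : Int := Int.lor (pvCode cs j) ((pvCode cs (j + 1)) <<< (16 : Nat))

theorem pv_getD_set_self (l : List Int) (i : Nat) (v : Int) (h : i < l.length) :
    (l.set i v).getD i 0 = v := by
  simp [List.getD_eq_getElem?_getD, h]

theorem pv_getD_set_ne (l : List Int) (i j : Nat) (v : Int) (h : i ≠ j) :
    (l.set i v).getD j 0 = l.getD j 0 := by
  simp [List.getD_eq_getElem?_getD, List.getElem?_set_ne h]

theorem pv_ldiff_zero (m : Nat) : Nat.ldiff m 0 = m := by
  apply Nat.eq_of_testBit_eq; intro i; simp [Nat.testBit_ldiff]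

theorem pv_lor_zero (x : Int) : Int.lor x 0 = x := by
  cases x <;> simp [Int.lor, pv_ldiff_zero]

theorem pv_shift_zero : ((0 : Int) <<< (16 : Nat)) = 0 := by decide

theorem pvF_ge (cs : List Char) (j : Nat) (h : ¬ j < cs.length) : pvF cs j = 0 := by
  have h1 : ¬ j + 1 < cs.length := by omega
  unfold pvF pvCode
  rw [if_neg h, if_neg h1, pv_shift_zero, pv_lor_zero]

theorem pvF_last (cs : List Char) (j : Nat) (h : j < cs.length) (h1 : ¬ j + 1 < cs.length) :
    pvF cs j = pvOrd (cs.getD j 'a') := by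
  unfold pvF pvCode
  rw [if_pos h, if_neg h1, pv_shift_zero, pv_lor_zero]

theorem pvF_mid (cs : List Char) (j : Nat) (h : j < cs.length) (h1 : j + 1 < cs.length) :
    pvF cs j = Int.lor (pvOrd (cs.getD j 'a')) ((pvOrd (cs.getD (j + 1) 'a')) <<< (16 : Nat)) := by
  unfold pvF pvCode
  rw [if_pos h, if_pos h1]

theorem pv_getD_replicate_zero (n m : Nat) : (List.replicate n (0 : Int)).getD m 0 = 0 := by
  induction n generalizing m with
  | zero => rfl
  | succ n ih =>
    cases m with
    | zero => rfl
    | succ m =>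
      have := ih m
      simp [List.replicate]

theorem pvLoopA_getD (cs : List Char) :
    ∀ (fuel i : Nat) (acc : List Int) (j : Nat),
      acc.length = 32 → i + fuel = 32 → j < 32 →
      (∀ m, i ≤ m → acc.getD m 0 = 0) →
      (pvLoopA cs i acc fuel).getD j 0 = if j < i then acc.getD j 0 else pvF cs j := by
  intro fuel
  induction fuel with
  | zero =>
    intro i acc j hlen hfuel hj hz
    simp [pvLoopA]
    intro h; omega
  | succ fuel ih =>
    intro i acc j hlen hfuel hj hz
    rw [pvLoopA]
    by_cases hbr : i ≥ cs.length
    · rw [if_pos hbr]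
      by_cases hji : j < i
      · rw [if_pos hji]
      · rw [if_neg hji, hz j (by omega), pvF_ge cs j (by omega)]
    · rw [if_neg hbr]
      have hin : i < cs.length := by omega
      have hi32 : i < 32 := by omega
      by_cases hbr2 : i + 1 ≥ cs.length
      · rw [if_pos hbr2]
        by_cases hji : j < i
        · rw [if_pos hji, pv_getD_set_ne _ _ _ _ (by omega)]
        · rw [if_neg hji]
          by_cases hji2 : j = i
          · subst hji2
            rw [pv_getD_set_self _ _ _ (by omega), pvF_last cs j hin (by omega)]
          · rw [pv_getD_set_ne _ _ _ _ (by omega), hz j (by omega),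
              pvF_ge cs j (by omega)]
      · rw [if_neg hbr2]
        have hset1 : ((acc.set i (pvOrd (cs.getD i 'a'))).getD i 0) = pvOrd (cs.getD i 'a') :=
          pv_getD_set_self _ _ _ (by omega)
        rw [ih (i + 1) _ j (by simp [hlen]) (by omega) hj ?_]
        · by_cases hji : j < i
          · rw [if_pos (by omega : j < i + 1), if_pos hji,
              pv_getD_set_ne _ _ _ _ (by omega), pv_getD_set_ne _ _ _ _ (by omega)]
          · by_cases hji2 : j = i
            · subst hji2
              rw [if_pos (by omega : j < j + 1),
                pv_getD_set_self _ _ _ (by simp [hlen]; omega), hset1,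
                pvF_mid cs j hin (by omega), if_neg hji]
            · rw [if_neg (by omega : ¬ j < i + 1), if_neg hji]
        · intro m hm
          rw [pv_getD_set_ne _ _ _ _ (by omega), pv_getD_set_ne _ _ _ _ (by omega)]
          exact hz m (by omega)

theorem pvLoopA_final (cs : List Char) (j : Nat) (hj : j < 32) :
    (pvLoopA cs 0 (List.replicate 32 0) 32).getD j 0 = pvF cs j := by
  rw [pvLoopA_getD cs 32 0 _ j (by simp) rfl hj
    (by intro m _; exact pv_getD_replicate_zero 32 m)]
  simp

-- B-side characterisation
theorem pvGo_fst (cs : List Char) : (pvGo cs).1 = pvCode cs 0 := by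
  cases cs with
  | nil => simp [pvGo, pvCode]
  | cons c rest => simp [pvGo, pvCode]

theorem pvCode_cons (c : Char) (rest : List Char) (k : Nat) :
    pvCode (c :: rest) (k + 1) = pvCode rest k := by
  simp [pvCode]

theorem pvGo_getD (cs : List Char) (j : Nat) : (pvGo cs).2.getD j 0 = pvF cs j := by
  induction cs generalizing j with
  | nil =>
    rw [pvF_ge _ _ (by simp)]
    simp [pvGo]
  | cons c rest ih =>
    cases j with
    | zero =>
      show Int.lor (pvOrd c) ((pvGo rest).1 <<< (16 : Nat)) = pvF (c :: rest) 0
      rw [pvGo_fst]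
      unfold pvF
      simp [pvCode]
    | succ j =>
      show (pvGo rest).2.getD j 0 = pvF (c :: rest) (j + 1)
      rw [ih j]
      unfold pvF
      rw [pvCode_cons c rest j, pvCode_cons c rest (j + 1)]

theorem pv_getD_append_rep (xs : List Int) (j : Nat) (hj : j < 32) :
    ((xs ++ List.replicate 32 0).take 32).getD j 0 = xs.getD j 0 := by
  have hlen2 : 32 ≤ (xs ++ List.replicate 32 0).length := by simp
  rw [List.getD_eq_getElem?_getD, List.getElem?_take, if_pos hj, ← List.getD_eq_getElem?_getD]
  by_cases h : j < xs.length
  · rw [List.getD_append _ _ _ _ h]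
  · have hx : xs.getD j 0 = 0 := by
      rw [List.getD_eq_getElem?_getD, List.getElem?_eq_none (by omega : xs.length ≤ j)]
      rfl
    rw [hx, List.getD_append_right _ _ _ _ (by omega : xs.length ≤ j), pv_getD_replicate_zero]

theorem pvCode_take (cs : List Char) (k : Nat) (hk : k < 33) :
    pvCode (cs.take 33) k = pvCode cs k := by
  unfold pvCode
  by_cases h : k < cs.length
  · rw [if_pos (by simp [List.length_take]; omega), if_pos h]
    simp [List.getD_eq_getElem?_getD, hk]
  · rw [if_neg (by simp [List.length_take]; omega), if_neg h]

theorem pvSlot_eq (filename : String) (j : Nat) (hj : j < 32) :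
    (((pvGo (filename.toList.take 33)).2 ++ List.replicate 32 0).take 32).getD j 0
      = pvF filename.toList j := by
  rw [pv_getD_append_rep _ _ hj,
    pvGo_getD]
  unfold pvF
  rw [pvCode_take filename.toList j (by omega), pvCode_take filename.toList (j + 1) (by omega)]

-- ===== VERDICT (by name: the statement is the Claim_ definition above) =====
theorem convert_filename_spec : Claim_equal_convert_filename := by
  intro filename _
  unfold Spec_convert_filename convert_filename convert_filename_alt
  simp only [Prod.mk.injEq]
  refine ⟨?_, ?_, ?_, ?_, ?_, ?_, ?_, ?_, ?_, ?_, ?_, ?_, ?_, ?_, ?_, ?_, ?_, ?_, ?_, ?_,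
    ?_, ?_, ?_, ?_, ?_, ?_, ?_, ?_, ?_, ?_, ?_, ?_⟩ <;>
    rw [pvLoopA_final _ _ (by omega), pvSlot_eq _ _ (by omega)]
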